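-- pv_equiv track=rewrite | github.com/Zjianglin/timePredict | utils/footprint.py | _unrelated
-- ===== SOURCE A (Python) =====
-- def _unrelated(activities, directly_follows):
--     '''Return all pairs of activities in a `unrelated` relation.
--        i.e. a # b iff not(a>b) and not(b>a)
--     '''
--     unrelated = set()
--     for a in activities:
--         for b in activities:
--             if a == b:
--                 unrelated.add((a, a))
--             elif (((a, b) not in directly_follows) and ((b, a) not in directly_follows)):
--                 unrelated.add((a, b))
--                 unrelated.add((b, a))
--     return unrelated
-- ===== SOURCE B (Python) =====
-- def _unrelated(activities, directly_follows):
--     '''Peel the activity list head by head and scan only the strictly-later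
--     activities: each unordered pair is examined once instead of twice.'''
--     out = set()
--     rest = list(activities)
--     while rest:
--         a, rest = rest[0], rest[1:]
--         out.add((a, a))
--         for b in rest:
--             if a != b and (a, b) not in directly_follows and (b, a) not in directly_follows:
--                 out.add((a, b))
--                 out.add((b, a))
--     return out
-- ===== Notes on version B (the rewrite author's own statement) =====
-- stated objective: alternative
-- what changed: B peels the activity list and pairs each head only with strictly-later activities (each unordered pair examined once, diagonal added unconditionally per head), instead of A's full Cartesian double loop over all ordered pairs.
import Mathlib
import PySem

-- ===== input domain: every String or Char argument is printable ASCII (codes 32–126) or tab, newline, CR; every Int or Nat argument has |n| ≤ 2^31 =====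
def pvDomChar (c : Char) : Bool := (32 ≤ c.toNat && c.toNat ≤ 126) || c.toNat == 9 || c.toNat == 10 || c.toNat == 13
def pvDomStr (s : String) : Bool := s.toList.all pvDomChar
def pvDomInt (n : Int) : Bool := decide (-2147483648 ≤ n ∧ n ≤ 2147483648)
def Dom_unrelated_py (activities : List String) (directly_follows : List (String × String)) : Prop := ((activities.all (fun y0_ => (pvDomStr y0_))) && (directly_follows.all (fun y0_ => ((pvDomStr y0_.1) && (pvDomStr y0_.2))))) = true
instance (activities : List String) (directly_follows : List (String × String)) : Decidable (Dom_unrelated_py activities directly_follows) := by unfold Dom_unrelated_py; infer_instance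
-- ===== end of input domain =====

-- B pairs each activity only with strictly-later ones (each unordered pair once) instead of A's full Cartesian double loop; return value proven equal (same set, same insertion order).
-- ===== PORT A =====
-- inner-loop body of A: the `if a == b / elif` cell step
def aStep (directly_follows : List (String × String)) (a : String)
    (s : PySem.Set (String × String)) (b : String) : PySem.Set (String × String) :=
  if a = b then PySem.Set.add s (a, a)
  else if (a, b) ∉ directly_follows ∧ (b, a) ∉ directly_follows then
    PySem.Set.add (PySem.Set.add s (a, b)) (b, a)
  else s

def unrelated_py (activities : List String) (directly_follows : List (String × String)) : List (String × String) :=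
  activities.foldl (fun s a => activities.foldl (aStep directly_follows a) s)
    (PySem.Set.empty : PySem.Set (String × String))

-- ===== PORT B =====
-- B's inner `for b in rest` loop
def bInner (directly_follows : List (String × String)) (a : String)
    (rest : List String) (s : PySem.Set (String × String)) : PySem.Set (String × String) :=
  rest.foldl (fun s b =>
    if a ≠ b ∧ (a, b) ∉ directly_follows ∧ (b, a) ∉ directly_follows then
      PySem.Set.add (PySem.Set.add s (a, b)) (b, a)
    else s) s

-- B's `while rest:` loop, peeling the head
def bLoop (directly_follows : List (String × String)) :
    List String → PySem.Set (String × String) → PySem.Set (String × String)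
  | [], s => s
  | a :: rest, s => bLoop directly_follows rest (bInner directly_follows a rest (PySem.Set.add s (a, a)))

def unrelated_py_alt (activities : List String) (directly_follows : List (String × String)) : List (String × String) :=
  bLoop directly_follows activities (PySem.Set.empty : PySem.Set (String × String))

-- ===== PRECONDITION & SPEC =====
def Spec_unrelated_py (activities : List String) (directly_follows : List (String × String)) (out : List (String × String)) : Prop := out = unrelated_py_alt activities directly_follows
instance (activities : List String) (directly_follows : List (String × String)) (out : List (String × String)) : Decidable (Spec_unrelated_py activities directly_follows out) := by unfold Spec_unrelated_py; infer_instance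

-- ===== CLAIM (what is proved, stated in full; the proofs are below) =====
def Claim_equal_unrelated_py : Prop := ∀ (activities : List String) (directly_follows : List (String × String)), Dom_unrelated_py activities directly_follows → Spec_unrelated_py activities directly_follows (unrelated_py activities directly_follows)

-- ===== LEMMAS AND PROOFS =====



-- the symmetric "unrelated" condition on a pair of activities
def Unrel (df : List (String × String)) (a b : String) : Prop :=
  a ≠ b ∧ (a, b) ∉ df ∧ (b, a) ∉ df

theorem Unrel.symm {df : List (String × String)} {a b : String} (h : Unrel df a b) : Unrel df b a :=
  ⟨h.1.symm, h.2.2, h.2.1⟩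

-- "s already covers the rows of `done`": diagonal and all unrelated pairs touching `done`
def Cov (acts : List String) (df : List (String × String)) (done : List String)
    (s : PySem.Set (String × String)) : Prop :=
  (∀ b ∈ done, (b, b) ∈ s) ∧
  (∀ b ∈ done, ∀ c ∈ acts, Unrel df b c → (b, c) ∈ s ∧ (c, b) ∈ s)

theorem mem_bInner {df : List (String × String)} {a : String}
    {rest : List String} {s : PySem.Set (String × String)} {x : String × String}
    (h : x ∈ s) : x ∈ bInner df a rest s := by
  induction rest generalizing s with
  | nil => exact h
  | cons b rest ih =>
    simp only [bInner, List.foldl_cons] at *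
    apply ih
    split_ifs <;> simp [PySem.Set.mem_add, h]

theorem bInner_adds {df : List (String × String)} {a : String} :
    ∀ (rest : List String) (s : PySem.Set (String × String)) (c : String),
      c ∈ rest → Unrel df a c →
      (a, c) ∈ bInner df a rest s ∧ (c, a) ∈ bInner df a rest s := by
  intro rest
  induction rest with
  | nil => intro s c hc; cases hc
  | cons b rest ih =>
    intro s c hc hu
    simp only [bInner, List.foldl_cons]
    rcases List.mem_cons.mp hc with rfl | hc
    · -- c = b : inserted at this step, preserved afterwards
      have hu' : a ≠ c ∧ (a, c) ∉ df ∧ (c, a) ∉ df := hu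
      rw [if_pos hu']
      constructor <;> exact mem_bInner (by simp [PySem.Set.mem_add])
    · exact ih _ c hc hu

-- a fold whose every step fixes s returns s
theorem foldl_fix {α β : Type} (f : α → β → α) (s : α) (l : List β)
    (h : ∀ b ∈ l, f s b = s) : l.foldl f s = s := by
  induction l with
  | nil => rfl
  | cons b l ih =>
    simp only [List.foldl_cons, h b (by simp)]
    exact ih (fun b hb => h b (by simp [hb]))

-- A's cells over already-covered columns change nothing
theorem foldl_aStep_done {acts df : _} {done : List String} {a : String}
    {s : PySem.Set (String × String)}
    (hcov : Cov acts df done s) (ha : a ∈ acts) :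
    done.foldl (aStep df a) s = s := by
  apply foldl_fix
  intro b hb
  unfold aStep
  by_cases hab : a = b
  · subst hab
    rw [if_pos rfl, PySem.Set.add_of_mem (hcov.1 a hb)]
  · rw [if_neg hab]
    by_cases hu : (a, b) ∉ df ∧ (b, a) ∉ df
    · rw [if_pos hu]
      have h2 := hcov.2 b hb a ha ⟨fun h => hab h.symm, hu.2, hu.1⟩
      rw [PySem.Set.add_of_mem h2.2, PySem.Set.add_of_mem h2.1]
    · rw [if_neg hu]

-- on the strictly-later columns A's cell step and B's cell step coincide once (a,a) is in s
theorem foldl_aStep_eq_bInner {df : List (String × String)} {a : String} :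
    ∀ (l : List String) (s : PySem.Set (String × String)), (a, a) ∈ s →
      l.foldl (aStep df a) s = bInner df a l s := by
  intro l
  induction l with
  | nil => intro s _; rfl
  | cons b l ih =>
    intro s hs
    simp only [bInner, List.foldl_cons]
    by_cases hab : a = b
    · subst hab
      have : aStep df a s a = s := by
        unfold aStep; rw [if_pos rfl, PySem.Set.add_of_mem hs]
      rw [this, if_neg (by simp)]
      exact ih s hs
    · have hstep : aStep df a s b =
          (if a ≠ b ∧ (a, b) ∉ df ∧ (b, a) ∉ df then
            PySem.Set.add (PySem.Set.add s (a, b)) (b, a) else s) := by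
        unfold aStep
        by_cases hu : (a, b) ∉ df ∧ (b, a) ∉ df
        · rw [if_neg hab, if_pos hu, if_pos ⟨hab, hu⟩]
        · rw [if_neg hab, if_neg hu, if_neg (by rintro ⟨-, h⟩; exact hu h)]
      rw [hstep]
      split_ifs with h
      · exact ih _ (by simp [PySem.Set.mem_add, hs])
      · exact ih _ hs

-- main induction: with the `done` rows covered, A's remaining full rows equal B's triangular rows
theorem main_loop {df : List (String × String)} :
    ∀ (rest done : List String) (s : PySem.Set (String × String)),
      Cov (done ++ rest) df done s →
      rest.foldl (fun s a => (done ++ rest).foldl (aStep df a) s) s = bLoop df rest s := by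
  intro rest
  induction rest with
  | nil => intro done s _; rfl
  | cons a rest ih =>
    intro done s hcov
    have hmemacts : a ∈ done ++ a :: rest := by simp
    -- A's row for `a` equals B's row for `a`
    have hrow : (done ++ a :: rest).foldl (aStep df a) s
        = bInner df a rest (PySem.Set.add s (a, a)) := by
      rw [List.foldl_append, foldl_aStep_done hcov hmemacts, List.foldl_cons]
      have hdiag : aStep df a s a = PySem.Set.add s (a, a) := by
        unfold aStep; rw [if_pos rfl]
      rw [hdiag]
      exact foldl_aStep_eq_bInner rest _ (by simp [PySem.Set.mem_add])
    set t := bInner df a rest (PySem.Set.add s (a, a)) with ht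
    have hsub : ∀ x ∈ s, x ∈ t := fun x hx =>
      mem_bInner (by simp [PySem.Set.mem_add, hx])
    have hcov' : Cov ((done ++ [a]) ++ rest) df (done ++ [a]) t := by
      constructor
      · intro b hb
        rcases (by simpa using hb : b ∈ done ∨ b = a) with hb | rfl
        · exact hsub _ (hcov.1 b hb)
        · exact mem_bInner (by simp [PySem.Set.mem_add])
      · intro b hb c hc hu
        rcases (by simpa using hb : b ∈ done ∨ b = a) with hb | rfl
        · have hc' : c ∈ done ++ a :: rest := by
            simpa [List.append_assoc] using hc
          have := hcov.2 b hb c hc' hu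
          exact ⟨hsub _ this.1, hsub _ this.2⟩
        · rcases (by simpa using hc : c ∈ done ∨ c = b ∨ c ∈ rest) with hc | rfl | hc
          · have := hcov.2 c hc b hmemacts hu.symm
            exact ⟨hsub _ this.2, hsub _ this.1⟩
          · exact absurd rfl hu.1
          · exact bInner_adds rest _ c hc hu
    have := ih (done ++ [a]) t hcov'
    simp only [List.append_assoc, List.cons_append, List.nil_append] at this
    rw [List.foldl_cons, hrow, bLoop, ← this]

-- ===== VERDICT (by name: the statement is the Claim_ definition above) =====
theorem unrelated_py_spec : Claim_equal_unrelated_py := by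
  intro activities directly_follows _
  unfold Spec_unrelated_py unrelated_py unrelated_py_alt
  have := main_loop (df := directly_follows) activities [] PySem.Set.empty
    ⟨by simp, by simp⟩
  simpa using this
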